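-- pv_equiv track=rewrite | github.com/fmarcinek/Artificial-Intelligence | lista1/z3/poker.py | dajMax
-- ===== SOURCE A (Python) =====
-- def dajMax(karty):
--     slownik = {}
--     for k in karty:
--         fig = k[1]
--         if fig in slownik:
--             slownik[fig] += 1
--         else:
--             slownik[fig] = 1
--     return max(slownik.values())
-- ===== SOURCE B (Python) =====
-- def dajMax(karty):
--     # sort the figures, then scan runs of equal consecutive figures,
--     # keeping the best run length seen so far
--     figs = sorted(k[1] for k in karty)
--     best = 0
--     run = 0
--     prev = None
--     for f in figs:
--         run = run + 1 if f == prev else 1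
--         if run > best:
--             best = run
--         prev = f
--     return best
-- ===== Notes on version B (the rewrite author's own statement) =====
-- stated objective: alternative
-- what changed: Replaces the dict-based frequency counting followed by max(values) with a sort-then-scan of runs of equal consecutive figures, keeping a running best run length.
import Mathlib
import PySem

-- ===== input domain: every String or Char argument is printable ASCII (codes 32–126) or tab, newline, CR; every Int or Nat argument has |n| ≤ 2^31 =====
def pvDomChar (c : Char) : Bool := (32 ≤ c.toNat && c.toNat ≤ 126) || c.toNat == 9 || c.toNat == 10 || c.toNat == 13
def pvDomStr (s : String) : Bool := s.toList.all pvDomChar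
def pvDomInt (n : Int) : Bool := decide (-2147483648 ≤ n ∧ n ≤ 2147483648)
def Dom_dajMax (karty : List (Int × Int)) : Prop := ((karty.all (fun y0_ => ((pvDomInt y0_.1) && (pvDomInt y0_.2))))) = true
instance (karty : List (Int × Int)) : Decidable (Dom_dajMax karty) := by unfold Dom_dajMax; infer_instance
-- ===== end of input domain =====

-- B replaces the dict frequency count + max(values) by a sort-then-scan of runs of equal
-- consecutive figures (objective: alternative algorithm, similar cost).


-- ===== PORT A =====
def dajMax (karty : List (Int × Int)) : Int :=
  let slownik := karty.foldl (fun (d : PySem.Dict Int Int) k =>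
      if d.contains k.2 then d.insert k.2 (d.getD k.2 0 + 1)
      else d.insert k.2 1) PySem.Dict.empty
  -- max(slownik.values()): Python raises ValueError on an empty dict; Pre_ excludes that input
  match PySem.List.max? slownik.values (fun x => x) with
  | some m => m
  | none => 0

-- ===== PORT B =====
-- one step of Source B's loop body over the state (best, run, prev)
def dajMaxStep (st : Int × Int × Option Int) (f : Int) : Int × Int × Option Int :=
  let run := if some f = st.2.2 then st.2.1 + 1 else 1
  let best := if run > st.1 then run else st.1
  (best, run, some f)

def dajMax_alt (karty : List (Int × Int)) : Int :=
  let figs := PySem.List.sorted (karty.map (fun k => k.2)) (fun x => x) false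
  (figs.foldl dajMaxStep (0, 0, none)).1

-- ===== PRECONDITION & SPEC =====
-- Pre_ excludes only the empty list, on which A's max() raises ValueError (B itself returns 0 there).
def Pre_dajMax (karty : List (Int × Int)) : Prop := karty ≠ []
instance (karty : List (Int × Int)) : Decidable (Pre_dajMax karty) := by unfold Pre_dajMax; infer_instance
def pvWitness_dajMax : (List (Int × Int)) := [(1, 2), (3, 2)]

def Spec_dajMax (karty : List (Int × Int)) (out : Int) : Prop := out = dajMax_alt karty
instance (karty : List (Int × Int)) (out : Int) : Decidable (Spec_dajMax karty out) := by unfold Spec_dajMax; infer_instance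

-- ===== CLAIM (what is proved, stated in full; the proofs are below) =====
def Claim_equal_dajMax : Prop := ∀ (karty : List (Int × Int)), Dom_dajMax karty → Pre_dajMax karty → Spec_dajMax karty (dajMax karty)

-- ===== LEMMAS AND PROOFS =====

lemma count_singleton_ne {x f : Int} (h : x ≠ f) : List.count x [f] = 0 :=
  List.count_eq_zero.mpr (by simp [h])

-- A's dict-building loop is Counter(figures)
lemma foldA_eq (l : List (Int × Int)) (d : PySem.Dict Int Int) :
    l.foldl (fun (d : PySem.Dict Int Int) k =>
      if d.contains k.2 then d.insert k.2 (d.getD k.2 0 + 1)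
      else d.insert k.2 1) d
    = (l.map (fun k => k.2)).foldl (fun d x => d.insert x (d.getD x 0 + 1)) d := by
  induction l generalizing d with
  | nil => rfl
  | cons k t ih =>
      simp only [List.foldl_cons, List.map_cons]
      by_cases h : d.contains k.2 = true
      · rw [if_pos h, ih]
      · rw [if_neg h, ih, PySem.Dict.getD_of_not_contains _ _ (by simpa using h)]
        norm_num

-- run-scan invariant: after processing the sorted prefix q ++ [L], the state is
-- (best = max count in the prefix, run = count of L in the prefix, prev = L)
lemma scanB (l : List Int) : ∀ (q : List Int) (L best run : Int),
    (q ++ L :: l).Pairwise (fun a b => a ≤ b) →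
    run = (List.count L (q ++ [L]) : Int) →
    (∃ x ∈ q ++ [L], best = (List.count x (q ++ [L]) : Int)) →
    (∀ x ∈ q ++ [L], (List.count x (q ++ [L]) : Int) ≤ best) →
    (∃ x ∈ q ++ L :: l, (l.foldl dajMaxStep (best, run, some L)).1 = (List.count x (q ++ L :: l) : Int)) ∧
    (∀ x ∈ q ++ L :: l, (List.count x (q ++ L :: l) : Int) ≤ (l.foldl dajMaxStep (best, run, some L)).1) := by
  induction l with
  | nil =>
      intro q L best run hpw hrun hex hall
      exact ⟨hex, hall⟩
  | cons f t ih =>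
      intro q L best run hpw hrun hex hall
      simp only [List.foldl_cons]
      by_cases hfL : f = L
      · subst hfL
        have hstep : dajMaxStep (best, run, some f) f
            = (if run + 1 > best then run + 1 else best, run + 1, some f) := by
          simp [dajMaxStep]
        rw [hstep]
        have hcnt : List.count f ((q ++ [f]) ++ [f]) = List.count f (q ++ [f]) + 1 := by
          simp [List.count_append]
        have H := ih (q ++ [f]) f (if run + 1 > best then run + 1 else best) (run + 1)
          (by simpa [List.append_assoc] using hpw)
          (by rw [hcnt]; push_cast; omega)
          (by
            by_cases hgt : run + 1 > best
            · refine ⟨f, by simp, ?_⟩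
              rw [if_pos hgt, hcnt]; push_cast; omega
            · rw [if_neg hgt]
              obtain ⟨x, hx, hbx⟩ := hex
              have hxf : x ≠ f := by
                rintro rfl
                rw [← hrun] at hbx
                omega
              refine ⟨x, by simp [List.mem_append] at hx ⊢; tauto, ?_⟩
              rw [List.count_append (l₁ := q ++ [f]) (l₂ := [f]), count_singleton_ne hxf]
              simpa using hbx)
          (by
            intro x hx
            have hle : best ≤ (if run + 1 > best then run + 1 else best) := by
              split <;> omega
            rcases List.mem_append.mp hx with hx | hx
            · by_cases hxf : x = f
              · subst hxf
                rw [hcnt]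
                split <;> omega
              · rw [List.count_append (l₁ := q ++ [f]) (l₂ := [f]), count_singleton_ne hxf]
                have := hall x hx
                omega
            · have hxf : x = f := by simpa using hx
              rw [hxf, hcnt]
              split <;> omega)
        constructor
        · obtain ⟨x, hx, hvx⟩ := H.1
          exact ⟨x, by simpa [List.append_assoc] using hx,
            by simpa [List.append_assoc] using hvx⟩
        · intro x hx
          have := H.2 x (by simpa [List.append_assoc] using hx)
          simpa [List.append_assoc] using this
      · -- f ≠ L : a new, strictly larger figure starts a run of length 1
        have hbest1 : (1 : Int) ≤ best := by
          obtain ⟨x, hx, hbx⟩ := hex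
          have : 0 < List.count x (q ++ [L]) := List.count_pos_iff.mpr hx
          omega
        have hstep : dajMaxStep (best, run, some L) f = (best, 1, some f) := by
          simp [dajMaxStep, hfL]
          omega
        rw [hstep]
        have hnotmem : f ∉ q ++ [L] := by
          rw [List.pairwise_append] at hpw
          obtain ⟨-, hp2, hcross⟩ := hpw
          have hLf : L ≤ f := (List.pairwise_cons.mp hp2).1 f (by simp)
          intro hmem
          rcases List.mem_append.mp hmem with hq | hL
          · have : f ≤ L := hcross f hq L (by simp)
            exact hfL (le_antisymm this hLf)
          · exact hfL (by simpa using hL)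
        have hcnt0 : List.count f (q ++ [L]) = 0 := List.count_eq_zero.mpr hnotmem
        have H := ih (q ++ [L]) f best 1
          (by simpa [List.append_assoc] using hpw)
          (by rw [List.count_append (l₁ := q ++ [L]) (l₂ := [f]), hcnt0]; simp)
          (by
            obtain ⟨x, hx, hbx⟩ := hex
            have hxf : x ≠ f := fun h => hnotmem (by rwa [h] at hx)
            refine ⟨x, by simp [List.mem_append] at hx ⊢; tauto, ?_⟩
            rw [List.count_append (l₁ := q ++ [L]) (l₂ := [f]), count_singleton_ne hxf]
            simpa using hbx)
          (by
            intro x hx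
            rcases List.mem_append.mp hx with hx | hx
            · have hxf : x ≠ f := fun h => hnotmem (by rwa [h] at hx)
              rw [List.count_append (l₁ := q ++ [L]) (l₂ := [f]), count_singleton_ne hxf]
              have := hall x hx
              omega
            · have hxf : x = f := by simpa using hx
              rw [hxf, List.count_append (l₁ := q ++ [L]) (l₂ := [f]), hcnt0]
              simpa using hbest1)
        constructor
        · obtain ⟨x, hx, hvx⟩ := H.1
          exact ⟨x, by simpa [List.append_assoc] using hx,
            by simpa [List.append_assoc] using hvx⟩
        · intro x hx
          have := H.2 x (by simpa [List.append_assoc] using hx)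
          simpa [List.append_assoc] using this

theorem dajMax_spec : Claim_equal_dajMax := by
  intro karty hdom hpre
  unfold Spec_dajMax dajMax dajMax_alt
  have hmsne : karty.map (fun k => k.2) ≠ [] := by
    simpa using hpre
  cases hs : PySem.List.sorted (karty.map (fun k => k.2)) (fun x => x) false with
  | nil => exact absurd ((PySem.List.sorted_eq_nil_iff _ _ _).mp hs) hmsne
  | cons f t =>
      have hperm : (f :: t).Perm (karty.map (fun k => k.2)) := by
        rw [← hs]; exact PySem.List.sorted_perm _ _ false
      have hpw : (f :: t).Pairwise (fun a b => a ≤ b) := by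
        have h := PySem.List.sorted_pairwise (karty.map (fun k => k.2)) (fun x => x)
        rw [hs] at h
        exact h
      have hstep0 : dajMaxStep (0, 0, none) f = (1, 1, some f) := by
        simp [dajMaxStep]
      have hB := scanB t [] f 1 1 (by simpa using hpw) (by simp) (by simp) (by simp)
      simp only [List.nil_append] at hB
      -- A's dict is Counter(figures)
      have hdict : karty.foldl (fun (d : PySem.Dict Int Int) k =>
            if d.contains k.2 then d.insert k.2 (d.getD k.2 0 + 1)
            else d.insert k.2 1) PySem.Dict.empty
          = PySem.Dict.counter (karty.map (fun k => k.2)) := by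
        rw [foldA_eq]
        exact PySem.Dict.foldl_insert_getD_add_one_eq_counter _
      have hvals : (PySem.Dict.counter (karty.map (fun k => k.2))).values
          = (PySem.Set.ofList (karty.map (fun k => k.2))).map
              (fun k => (List.count k (karty.map (fun j => j.2)) : Int)) := by
        rw [PySem.Dict.values_eq_map_keys _ (PySem.Dict.nodup_keys_counter _) 0,
            PySem.Dict.keys_counter]
        simp [PySem.Dict.getD_counter]
      have hfmem : f ∈ karty.map (fun k => k.2) := hperm.mem_iff.mp (by simp)
      have hvne : (PySem.Dict.counter (karty.map (fun k => k.2))).values ≠ [] := by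
        rw [hvals]
        have : f ∈ PySem.Set.ofList (karty.map (fun k => k.2)) :=
          (PySem.Set.mem_ofList _ _).mpr hfmem
        exact fun h => List.ne_nil_of_mem this ((List.map_eq_nil_iff).mp h)
      cases hm : PySem.List.max? (PySem.Dict.counter (karty.map (fun k => k.2))).values
          (fun x => x) with
      | none => exact absurd ((PySem.List.max?_eq_none_iff _ _).mp hm) hvne
      | some m =>
          simp only [hdict, hm, List.foldl_cons, hstep0]
          -- characterise m
          have hmem := PySem.List.max?_mem hm
          rw [hvals] at hmem
          obtain ⟨k0, hk0, hk0m⟩ := List.mem_map.mp hmem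
          have hk0ms : k0 ∈ karty.map (fun k => k.2) := (PySem.Set.mem_ofList _ _).mp hk0
          have hmax := PySem.List.max?_isMax hm
          -- B's value bounds, transported along the permutation
          obtain ⟨⟨x0, hx0, hx0v⟩, hballe⟩ := hB
          have hx0ms : x0 ∈ karty.map (fun k => k.2) := hperm.mem_iff.mp hx0
          have hcnt : ∀ x, List.count x (f :: t) = List.count x (karty.map (fun k => k.2)) :=
            fun x => hperm.count_eq x
          apply le_antisymm
          · -- m ≤ B
            rw [← hk0m]
            have := hballe k0 (hperm.mem_iff.mpr hk0ms)
            rw [hcnt k0] at this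
            exact this
          · -- B ≤ m
            rw [hx0v, hcnt x0]
            have hxv : (List.count x0 (karty.map (fun k => k.2)) : Int)
                ∈ (PySem.Dict.counter (karty.map (fun k => k.2))).values := by
              rw [hvals]
              exact List.mem_map.mpr ⟨x0, (PySem.Set.mem_ofList _ _).mpr hx0ms, rfl⟩
            exact hmax _ hxv
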